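-- pv_equiv track=rewrite | github.com/fxrcode/LeetPy | WC/WC_289_Apr16.py | twofive
-- ===== SOURCE A (Python) =====
-- def twofive(x):
--     t, f = 0, 0
--
--     if x % 5 == 0:
--         for f in range(4, 0, -1):
--             if x % (5**f) == 0:
--                 break
--         x //= 5**f
--     if x % 2 == 0:
--         for t in range(9, 0, -1):
--             if x % (2**t) == 0:
--                 break
--     return t, f
-- ===== SOURCE B (Python) =====
-- def twofive(x):
--     f = 0
--     while x % 5 == 0 and f < 4:
--         x //= 5
--         f += 1
--     t = 0
--     while x % 2 == 0 and t < 9: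
--         x //= 2
--         t += 1
--     return (t, f)
-- ===== Notes on version B (the rewrite author's own statement) =====
-- stated objective: simpler
-- what changed: Replaced the descending power-testing break loops (which test divisibility by decreasing powers and then do a single big division) with plain ascending repeated-division counter loops that strip one factor of five (capped at four) and then one factor of two (capped at nine) per iteration.
import Mathlib
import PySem

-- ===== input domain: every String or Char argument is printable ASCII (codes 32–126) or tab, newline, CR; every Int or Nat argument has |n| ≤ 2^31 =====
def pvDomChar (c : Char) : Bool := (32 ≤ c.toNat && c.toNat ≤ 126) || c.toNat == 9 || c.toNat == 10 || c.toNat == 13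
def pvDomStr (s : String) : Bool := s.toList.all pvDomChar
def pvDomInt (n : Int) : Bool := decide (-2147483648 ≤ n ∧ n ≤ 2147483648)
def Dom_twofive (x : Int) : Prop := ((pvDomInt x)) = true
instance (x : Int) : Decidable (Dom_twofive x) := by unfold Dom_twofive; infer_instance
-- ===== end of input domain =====

-- B replaces A's descending power-testing break loops with ascending repeated-division counters (objective: simpler; same cost).
set_option maxHeartbeats 1000000

-- ===== PORT A =====
-- `for f in range(k, 0, -1): if x % (base**f) == 0: break` — f keeps the value at the break
-- (or the last range value if no break); `base**f` is ported as `base ^ f.toNat` (f is a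
-- nonnegative range element, so toNat is exact).
def pickExp (x : Int) (base : Int) : List Int → Int → Int
  | [], f => f
  | e :: rest, _ => if PySem.Int.mod x (base ^ e.toNat) = 0 then e else pickExp x base rest e

def twofive (x : Int) : Int × Int :=
  let t : Int := 0
  let f : Int := 0
  let p :=
    if PySem.Int.mod x 5 = 0 then
      let f := pickExp x 5 (PySem.List.pyRange 4 0 (-1)) f
      (PySem.Int.floordiv x (5 ^ f.toNat), f)
    else (x, f)
  let t := if PySem.Int.mod p.1 2 = 0 then pickExp p.1 2 (PySem.List.pyRange 9 0 (-1)) t else t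
  (t, p.2)

-- ===== PORT B =====
-- `while x % d == 0 and c < cap: x //= d; c += 1` — fuel = cap, the maximal number of iterations
def divLoop (d : Int) (cap : Int) : Nat → Int → Int → Int × Int
  | 0, x, c => (x, c)
  | n + 1, x, c =>
    if PySem.Int.mod x d = 0 ∧ c < cap then divLoop d cap n (PySem.Int.floordiv x d) (c + 1)
    else (x, c)

def twofive_alt (x : Int) : Int × Int :=
  let p := divLoop 5 4 4 x 0
  let q := divLoop 2 9 9 p.1 0
  (q.2, p.2)

-- ===== PRECONDITION & SPEC =====
def Spec_twofive (x : Int) (out : Int × Int) : Prop := out = twofive_alt x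
instance (x : Int) (out : Int × Int) : Decidable (Spec_twofive x out) := by unfold Spec_twofive; infer_instance

-- ===== CLAIM (what is proved, stated in full; the proofs are below) =====
def Claim_equal_twofive : Prop := ∀ (x : Int), Dom_twofive x → Spec_twofive x (twofive x)

-- ===== LEMMAS AND PROOFS =====

theorem pyRange40 : PySem.List.pyRange 4 0 (-1) = [4,3,2,1] := by
  rw [PySem.List.pyRange_neg_one]; decide

theorem pyRange90 : PySem.List.pyRange 9 0 (-1) = [9,8,7,6,5,4,3,2,1] := by
  rw [PySem.List.pyRange_neg_one]; decide

theorem lemma2 (y : Int) :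
    (if PySem.Int.mod y 2 = 0 then pickExp y 2 [9,8,7,6,5,4,3,2,1] 0 else 0)
      = (divLoop 2 9 9 y 0).2 := by
  by_cases h9 : (512:Int) ∣ y
  · -- count = 9
    obtain ⟨k, rfl⟩ := h9
    have hp : (512:Int) ∣ 512 * k := ⟨k, rfl⟩
    have d0 : (2:Int) ∣ 512 * k := ⟨256 * k, by rw [← mul_assoc]; norm_num⟩
    have d1 : (2:Int) ∣ 256 * k := ⟨128 * k, by rw [← mul_assoc]; norm_num⟩
    have d2 : (2:Int) ∣ 128 * k := ⟨64 * k, by rw [← mul_assoc]; norm_num⟩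
    have d3 : (2:Int) ∣ 64 * k := ⟨32 * k, by rw [← mul_assoc]; norm_num⟩
    have d4 : (2:Int) ∣ 32 * k := ⟨16 * k, by rw [← mul_assoc]; norm_num⟩
    have d5 : (2:Int) ∣ 16 * k := ⟨8 * k, by rw [← mul_assoc]; norm_num⟩
    have d6 : (2:Int) ∣ 8 * k := ⟨4 * k, by rw [← mul_assoc]; norm_num⟩
    have d7 : (2:Int) ∣ 4 * k := ⟨2 * k, by rw [← mul_assoc]; norm_num⟩
    have d8 : (2:Int) ∣ 2 * k := ⟨1 * k, by rw [← mul_assoc]; norm_num⟩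
    have e1 : (512 * k : Int) / 2 = 256 * k := by rw [show (512*k:Int) = 2*(256*k) from by rw [← mul_assoc]; norm_num, Int.mul_ediv_cancel_left _ (by norm_num)]
    have e2 : (256 * k : Int) / 2 = 128 * k := by rw [show (256*k:Int) = 2*(128*k) from by rw [← mul_assoc]; norm_num, Int.mul_ediv_cancel_left _ (by norm_num)]
    have e3 : (128 * k : Int) / 2 = 64 * k := by rw [show (128*k:Int) = 2*(64*k) from by rw [← mul_assoc]; norm_num, Int.mul_ediv_cancel_left _ (by norm_num)]
    have e4 : (64 * k : Int) / 2 = 32 * k := by rw [show (64*k:Int) = 2*(32*k) from by rw [← mul_assoc]; norm_num, Int.mul_ediv_cancel_left _ (by norm_num)]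
    have e5 : (32 * k : Int) / 2 = 16 * k := by rw [show (32*k:Int) = 2*(16*k) from by rw [← mul_assoc]; norm_num, Int.mul_ediv_cancel_left _ (by norm_num)]
    have e6 : (16 * k : Int) / 2 = 8 * k := by rw [show (16*k:Int) = 2*(8*k) from by rw [← mul_assoc]; norm_num, Int.mul_ediv_cancel_left _ (by norm_num)]
    have e7 : (8 * k : Int) / 2 = 4 * k := by rw [show (8*k:Int) = 2*(4*k) from by rw [← mul_assoc]; norm_num, Int.mul_ediv_cancel_left _ (by norm_num)]
    have e8 : (4 * k : Int) / 2 = 2 * k := by rw [show (4*k:Int) = 2*(2*k) from by rw [← mul_assoc]; norm_num, Int.mul_ediv_cancel_left _ (by norm_num)]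
    have e9 : (2 * k : Int) / 2 = k := Int.mul_ediv_cancel_left _ (by norm_num)
    simp only [Order.lt_two_iff, zero_le_one, PySem.Int.mod_eq_emod_of_pos, EuclideanDomain.mod_eq_zero, ↓reduceIte, pickExp, Int.reduceToNat, Int.reducePow, Nat.ofNat_pos, divLoop, and_self, PySem.Int.floordiv_eq_ediv_of_pos, zero_add, Nat.one_lt_ofNat, Int.reduceAdd, Int.reduceLT, Prod.mk.injEq, and_true, true_and, false_and, and_false, if_true, if_false, not_false_eq_true, hp, d0, d1, d2, d3, d4, d5, d6, d7, d8, e1, e2, e3, e4, e5, e6, e7, e8, e9]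
    try omega
  ·
    by_cases h8 : (256:Int) ∣ y
    · -- count = 8
      obtain ⟨k, rfl⟩ := h8
      have hp : (256:Int) ∣ 256 * k := ⟨k, rfl⟩
      have d0 : (2:Int) ∣ 256 * k := ⟨128 * k, by rw [← mul_assoc]; norm_num⟩
      have d1 : (2:Int) ∣ 128 * k := ⟨64 * k, by rw [← mul_assoc]; norm_num⟩
      have d2 : (2:Int) ∣ 64 * k := ⟨32 * k, by rw [← mul_assoc]; norm_num⟩
      have d3 : (2:Int) ∣ 32 * k := ⟨16 * k, by rw [← mul_assoc]; norm_num⟩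
      have d4 : (2:Int) ∣ 16 * k := ⟨8 * k, by rw [← mul_assoc]; norm_num⟩
      have d5 : (2:Int) ∣ 8 * k := ⟨4 * k, by rw [← mul_assoc]; norm_num⟩
      have d6 : (2:Int) ∣ 4 * k := ⟨2 * k, by rw [← mul_assoc]; norm_num⟩
      have d7 : (2:Int) ∣ 2 * k := ⟨1 * k, by rw [← mul_assoc]; norm_num⟩
      have e1 : (256 * k : Int) / 2 = 128 * k := by rw [show (256*k:Int) = 2*(128*k) from by rw [← mul_assoc]; norm_num, Int.mul_ediv_cancel_left _ (by norm_num)]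
      have e2 : (128 * k : Int) / 2 = 64 * k := by rw [show (128*k:Int) = 2*(64*k) from by rw [← mul_assoc]; norm_num, Int.mul_ediv_cancel_left _ (by norm_num)]
      have e3 : (64 * k : Int) / 2 = 32 * k := by rw [show (64*k:Int) = 2*(32*k) from by rw [← mul_assoc]; norm_num, Int.mul_ediv_cancel_left _ (by norm_num)]
      have e4 : (32 * k : Int) / 2 = 16 * k := by rw [show (32*k:Int) = 2*(16*k) from by rw [← mul_assoc]; norm_num, Int.mul_ediv_cancel_left _ (by norm_num)]
      have e5 : (16 * k : Int) / 2 = 8 * k := by rw [show (16*k:Int) = 2*(8*k) from by rw [← mul_assoc]; norm_num, Int.mul_ediv_cancel_left _ (by norm_num)]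
      have e6 : (8 * k : Int) / 2 = 4 * k := by rw [show (8*k:Int) = 2*(4*k) from by rw [← mul_assoc]; norm_num, Int.mul_ediv_cancel_left _ (by norm_num)]
      have e7 : (4 * k : Int) / 2 = 2 * k := by rw [show (4*k:Int) = 2*(2*k) from by rw [← mul_assoc]; norm_num, Int.mul_ediv_cancel_left _ (by norm_num)]
      have e8 : (2 * k : Int) / 2 = k := Int.mul_ediv_cancel_left _ (by norm_num)
      have cs : ¬ (2:Int) ∣ k := fun hk => by
        obtain ⟨m, hm⟩ := hk
        exact h9 ⟨m, by rw [hm]; ring⟩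
      simp only [Order.lt_two_iff, zero_le_one, PySem.Int.mod_eq_emod_of_pos, EuclideanDomain.mod_eq_zero, ↓reduceIte, pickExp, Int.reduceToNat, Int.reducePow, Nat.ofNat_pos, divLoop, and_self, PySem.Int.floordiv_eq_ediv_of_pos, zero_add, Nat.one_lt_ofNat, Int.reduceAdd, Int.reduceLT, Prod.mk.injEq, and_true, true_and, false_and, and_false, if_true, if_false, not_false_eq_true, h9, hp, d0, d1, d2, d3, d4, d5, d6, d7, e1, e2, e3, e4, e5, e6, e7, e8, cs]
      try omega
    ·
      by_cases h7 : (128:Int) ∣ y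
      · -- count = 7
        obtain ⟨k, rfl⟩ := h7
        have hp : (128:Int) ∣ 128 * k := ⟨k, rfl⟩
        have d0 : (2:Int) ∣ 128 * k := ⟨64 * k, by rw [← mul_assoc]; norm_num⟩
        have d1 : (2:Int) ∣ 64 * k := ⟨32 * k, by rw [← mul_assoc]; norm_num⟩
        have d2 : (2:Int) ∣ 32 * k := ⟨16 * k, by rw [← mul_assoc]; norm_num⟩
        have d3 : (2:Int) ∣ 16 * k := ⟨8 * k, by rw [← mul_assoc]; norm_num⟩
        have d4 : (2:Int) ∣ 8 * k := ⟨4 * k, by rw [← mul_assoc]; norm_num⟩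
        have d5 : (2:Int) ∣ 4 * k := ⟨2 * k, by rw [← mul_assoc]; norm_num⟩
        have d6 : (2:Int) ∣ 2 * k := ⟨1 * k, by rw [← mul_assoc]; norm_num⟩
        have e1 : (128 * k : Int) / 2 = 64 * k := by rw [show (128*k:Int) = 2*(64*k) from by rw [← mul_assoc]; norm_num, Int.mul_ediv_cancel_left _ (by norm_num)]
        have e2 : (64 * k : Int) / 2 = 32 * k := by rw [show (64*k:Int) = 2*(32*k) from by rw [← mul_assoc]; norm_num, Int.mul_ediv_cancel_left _ (by norm_num)]
        have e3 : (32 * k : Int) / 2 = 16 * k := by rw [show (32*k:Int) = 2*(16*k) from by rw [← mul_assoc]; norm_num, Int.mul_ediv_cancel_left _ (by norm_num)]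
        have e4 : (16 * k : Int) / 2 = 8 * k := by rw [show (16*k:Int) = 2*(8*k) from by rw [← mul_assoc]; norm_num, Int.mul_ediv_cancel_left _ (by norm_num)]
        have e5 : (8 * k : Int) / 2 = 4 * k := by rw [show (8*k:Int) = 2*(4*k) from by rw [← mul_assoc]; norm_num, Int.mul_ediv_cancel_left _ (by norm_num)]
        have e6 : (4 * k : Int) / 2 = 2 * k := by rw [show (4*k:Int) = 2*(2*k) from by rw [← mul_assoc]; norm_num, Int.mul_ediv_cancel_left _ (by norm_num)]
        have e7 : (2 * k : Int) / 2 = k := Int.mul_ediv_cancel_left _ (by norm_num)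
        have cs : ¬ (2:Int) ∣ k := fun hk => by
          obtain ⟨m, hm⟩ := hk
          exact h8 ⟨m, by rw [hm]; ring⟩
        simp only [Order.lt_two_iff, zero_le_one, PySem.Int.mod_eq_emod_of_pos, EuclideanDomain.mod_eq_zero, ↓reduceIte, pickExp, Int.reduceToNat, Int.reducePow, Nat.ofNat_pos, divLoop, and_self, PySem.Int.floordiv_eq_ediv_of_pos, zero_add, Nat.one_lt_ofNat, Int.reduceAdd, Int.reduceLT, Prod.mk.injEq, and_true, true_and, false_and, and_false, if_true, if_false, not_false_eq_true, h9, h8, hp, d0, d1, d2, d3, d4, d5, d6, e1, e2, e3, e4, e5, e6, e7, cs]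
        try omega
      ·
        by_cases h6 : (64:Int) ∣ y
        · -- count = 6
          obtain ⟨k, rfl⟩ := h6
          have hp : (64:Int) ∣ 64 * k := ⟨k, rfl⟩
          have d0 : (2:Int) ∣ 64 * k := ⟨32 * k, by rw [← mul_assoc]; norm_num⟩
          have d1 : (2:Int) ∣ 32 * k := ⟨16 * k, by rw [← mul_assoc]; norm_num⟩
          have d2 : (2:Int) ∣ 16 * k := ⟨8 * k, by rw [← mul_assoc]; norm_num⟩
          have d3 : (2:Int) ∣ 8 * k := ⟨4 * k, by rw [← mul_assoc]; norm_num⟩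
          have d4 : (2:Int) ∣ 4 * k := ⟨2 * k, by rw [← mul_assoc]; norm_num⟩
          have d5 : (2:Int) ∣ 2 * k := ⟨1 * k, by rw [← mul_assoc]; norm_num⟩
          have e1 : (64 * k : Int) / 2 = 32 * k := by rw [show (64*k:Int) = 2*(32*k) from by rw [← mul_assoc]; norm_num, Int.mul_ediv_cancel_left _ (by norm_num)]
          have e2 : (32 * k : Int) / 2 = 16 * k := by rw [show (32*k:Int) = 2*(16*k) from by rw [← mul_assoc]; norm_num, Int.mul_ediv_cancel_left _ (by norm_num)]
          have e3 : (16 * k : Int) / 2 = 8 * k := by rw [show (16*k:Int) = 2*(8*k) from by rw [← mul_assoc]; norm_num, Int.mul_ediv_cancel_left _ (by norm_num)]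
          have e4 : (8 * k : Int) / 2 = 4 * k := by rw [show (8*k:Int) = 2*(4*k) from by rw [← mul_assoc]; norm_num, Int.mul_ediv_cancel_left _ (by norm_num)]
          have e5 : (4 * k : Int) / 2 = 2 * k := by rw [show (4*k:Int) = 2*(2*k) from by rw [← mul_assoc]; norm_num, Int.mul_ediv_cancel_left _ (by norm_num)]
          have e6 : (2 * k : Int) / 2 = k := Int.mul_ediv_cancel_left _ (by norm_num)
          have cs : ¬ (2:Int) ∣ k := fun hk => by
            obtain ⟨m, hm⟩ := hk
            exact h7 ⟨m, by rw [hm]; ring⟩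
          simp only [Order.lt_two_iff, zero_le_one, PySem.Int.mod_eq_emod_of_pos, EuclideanDomain.mod_eq_zero, ↓reduceIte, pickExp, Int.reduceToNat, Int.reducePow, Nat.ofNat_pos, divLoop, and_self, PySem.Int.floordiv_eq_ediv_of_pos, zero_add, Nat.one_lt_ofNat, Int.reduceAdd, Int.reduceLT, Prod.mk.injEq, and_true, true_and, false_and, and_false, if_true, if_false, not_false_eq_true, h9, h8, h7, hp, d0, d1, d2, d3, d4, d5, e1, e2, e3, e4, e5, e6, cs]
          try omega
        ·
          by_cases h5 : (32:Int) ∣ y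
          · -- count = 5
            obtain ⟨k, rfl⟩ := h5
            have hp : (32:Int) ∣ 32 * k := ⟨k, rfl⟩
            have d0 : (2:Int) ∣ 32 * k := ⟨16 * k, by rw [← mul_assoc]; norm_num⟩
            have d1 : (2:Int) ∣ 16 * k := ⟨8 * k, by rw [← mul_assoc]; norm_num⟩
            have d2 : (2:Int) ∣ 8 * k := ⟨4 * k, by rw [← mul_assoc]; norm_num⟩
            have d3 : (2:Int) ∣ 4 * k := ⟨2 * k, by rw [← mul_assoc]; norm_num⟩
            have d4 : (2:Int) ∣ 2 * k := ⟨1 * k, by rw [← mul_assoc]; norm_num⟩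
            have e1 : (32 * k : Int) / 2 = 16 * k := by rw [show (32*k:Int) = 2*(16*k) from by rw [← mul_assoc]; norm_num, Int.mul_ediv_cancel_left _ (by norm_num)]
            have e2 : (16 * k : Int) / 2 = 8 * k := by rw [show (16*k:Int) = 2*(8*k) from by rw [← mul_assoc]; norm_num, Int.mul_ediv_cancel_left _ (by norm_num)]
            have e3 : (8 * k : Int) / 2 = 4 * k := by rw [show (8*k:Int) = 2*(4*k) from by rw [← mul_assoc]; norm_num, Int.mul_ediv_cancel_left _ (by norm_num)]
            have e4 : (4 * k : Int) / 2 = 2 * k := by rw [show (4*k:Int) = 2*(2*k) from by rw [← mul_assoc]; norm_num, Int.mul_ediv_cancel_left _ (by norm_num)]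
            have e5 : (2 * k : Int) / 2 = k := Int.mul_ediv_cancel_left _ (by norm_num)
            have cs : ¬ (2:Int) ∣ k := fun hk => by
              obtain ⟨m, hm⟩ := hk
              exact h6 ⟨m, by rw [hm]; ring⟩
            simp only [Order.lt_two_iff, zero_le_one, PySem.Int.mod_eq_emod_of_pos, EuclideanDomain.mod_eq_zero, ↓reduceIte, pickExp, Int.reduceToNat, Int.reducePow, Nat.ofNat_pos, divLoop, and_self, PySem.Int.floordiv_eq_ediv_of_pos, zero_add, Nat.one_lt_ofNat, Int.reduceAdd, Int.reduceLT, Prod.mk.injEq, and_true, true_and, false_and, and_false, if_true, if_false, not_false_eq_true, h9, h8, h7, h6, hp, d0, d1, d2, d3, d4, e1, e2, e3, e4, e5, cs]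
            try omega
          ·
            by_cases h4 : (16:Int) ∣ y
            · -- count = 4
              obtain ⟨k, rfl⟩ := h4
              have hp : (16:Int) ∣ 16 * k := ⟨k, rfl⟩
              have d0 : (2:Int) ∣ 16 * k := ⟨8 * k, by rw [← mul_assoc]; norm_num⟩
              have d1 : (2:Int) ∣ 8 * k := ⟨4 * k, by rw [← mul_assoc]; norm_num⟩
              have d2 : (2:Int) ∣ 4 * k := ⟨2 * k, by rw [← mul_assoc]; norm_num⟩
              have d3 : (2:Int) ∣ 2 * k := ⟨1 * k, by rw [← mul_assoc]; norm_num⟩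
              have e1 : (16 * k : Int) / 2 = 8 * k := by rw [show (16*k:Int) = 2*(8*k) from by rw [← mul_assoc]; norm_num, Int.mul_ediv_cancel_left _ (by norm_num)]
              have e2 : (8 * k : Int) / 2 = 4 * k := by rw [show (8*k:Int) = 2*(4*k) from by rw [← mul_assoc]; norm_num, Int.mul_ediv_cancel_left _ (by norm_num)]
              have e3 : (4 * k : Int) / 2 = 2 * k := by rw [show (4*k:Int) = 2*(2*k) from by rw [← mul_assoc]; norm_num, Int.mul_ediv_cancel_left _ (by norm_num)]
              have e4 : (2 * k : Int) / 2 = k := Int.mul_ediv_cancel_left _ (by norm_num)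
              have cs : ¬ (2:Int) ∣ k := fun hk => by
                obtain ⟨m, hm⟩ := hk
                exact h5 ⟨m, by rw [hm]; ring⟩
              simp only [Order.lt_two_iff, zero_le_one, PySem.Int.mod_eq_emod_of_pos, EuclideanDomain.mod_eq_zero, ↓reduceIte, pickExp, Int.reduceToNat, Int.reducePow, Nat.ofNat_pos, divLoop, and_self, PySem.Int.floordiv_eq_ediv_of_pos, zero_add, Nat.one_lt_ofNat, Int.reduceAdd, Int.reduceLT, Prod.mk.injEq, and_true, true_and, false_and, and_false, if_true, if_false, not_false_eq_true, h9, h8, h7, h6, h5, hp, d0, d1, d2, d3, e1, e2, e3, e4, cs]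
              try omega
            ·
              by_cases h3 : (8:Int) ∣ y
              · -- count = 3
                obtain ⟨k, rfl⟩ := h3
                have hp : (8:Int) ∣ 8 * k := ⟨k, rfl⟩
                have d0 : (2:Int) ∣ 8 * k := ⟨4 * k, by rw [← mul_assoc]; norm_num⟩
                have d1 : (2:Int) ∣ 4 * k := ⟨2 * k, by rw [← mul_assoc]; norm_num⟩
                have d2 : (2:Int) ∣ 2 * k := ⟨1 * k, by rw [← mul_assoc]; norm_num⟩
                have e1 : (8 * k : Int) / 2 = 4 * k := by rw [show (8*k:Int) = 2*(4*k) from by rw [← mul_assoc]; norm_num, Int.mul_ediv_cancel_left _ (by norm_num)]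
                have e2 : (4 * k : Int) / 2 = 2 * k := by rw [show (4*k:Int) = 2*(2*k) from by rw [← mul_assoc]; norm_num, Int.mul_ediv_cancel_left _ (by norm_num)]
                have e3 : (2 * k : Int) / 2 = k := Int.mul_ediv_cancel_left _ (by norm_num)
                have cs : ¬ (2:Int) ∣ k := fun hk => by
                  obtain ⟨m, hm⟩ := hk
                  exact h4 ⟨m, by rw [hm]; ring⟩
                simp only [Order.lt_two_iff, zero_le_one, PySem.Int.mod_eq_emod_of_pos, EuclideanDomain.mod_eq_zero, ↓reduceIte, pickExp, Int.reduceToNat, Int.reducePow, Nat.ofNat_pos, divLoop, and_self, PySem.Int.floordiv_eq_ediv_of_pos, zero_add, Nat.one_lt_ofNat, Int.reduceAdd, Int.reduceLT, Prod.mk.injEq, and_true, true_and, false_and, and_false, if_true, if_false, not_false_eq_true, h9, h8, h7, h6, h5, h4, hp, d0, d1, d2, e1, e2, e3, cs]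
                try omega
              ·
                by_cases h2 : (4:Int) ∣ y
                · -- count = 2
                  obtain ⟨k, rfl⟩ := h2
                  have hp : (4:Int) ∣ 4 * k := ⟨k, rfl⟩
                  have d0 : (2:Int) ∣ 4 * k := ⟨2 * k, by rw [← mul_assoc]; norm_num⟩
                  have d1 : (2:Int) ∣ 2 * k := ⟨1 * k, by rw [← mul_assoc]; norm_num⟩
                  have e1 : (4 * k : Int) / 2 = 2 * k := by rw [show (4*k:Int) = 2*(2*k) from by rw [← mul_assoc]; norm_num, Int.mul_ediv_cancel_left _ (by norm_num)]
                  have e2 : (2 * k : Int) / 2 = k := Int.mul_ediv_cancel_left _ (by norm_num)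
                  have cs : ¬ (2:Int) ∣ k := fun hk => by
                    obtain ⟨m, hm⟩ := hk
                    exact h3 ⟨m, by rw [hm]; ring⟩
                  simp only [Order.lt_two_iff, zero_le_one, PySem.Int.mod_eq_emod_of_pos, EuclideanDomain.mod_eq_zero, ↓reduceIte, pickExp, Int.reduceToNat, Int.reducePow, Nat.ofNat_pos, divLoop, and_self, PySem.Int.floordiv_eq_ediv_of_pos, zero_add, Nat.one_lt_ofNat, Int.reduceAdd, Int.reduceLT, Prod.mk.injEq, and_true, true_and, false_and, and_false, if_true, if_false, not_false_eq_true, h9, h8, h7, h6, h5, h4, h3, hp, d0, d1, e1, e2, cs]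
                  try omega
                ·
                  by_cases h1 : (2:Int) ∣ y
                  · -- count = 1
                    obtain ⟨k, rfl⟩ := h1
                    have hp : (2:Int) ∣ 2 * k := ⟨k, rfl⟩
                    have d0 : (2:Int) ∣ 2 * k := ⟨1 * k, by rw [← mul_assoc]; norm_num⟩
                    have e1 : (2 * k : Int) / 2 = k := Int.mul_ediv_cancel_left _ (by norm_num)
                    have cs : ¬ (2:Int) ∣ k := fun hk => by
                      obtain ⟨m, hm⟩ := hk
                      exact h2 ⟨m, by rw [hm]; ring⟩
                    simp only [Order.lt_two_iff, zero_le_one, PySem.Int.mod_eq_emod_of_pos, EuclideanDomain.mod_eq_zero, ↓reduceIte, pickExp, Int.reduceToNat, Int.reducePow, Nat.ofNat_pos, divLoop, and_self, PySem.Int.floordiv_eq_ediv_of_pos, zero_add, Nat.one_lt_ofNat, Int.reduceAdd, Int.reduceLT, Prod.mk.injEq, and_true, true_and, false_and, and_false, if_true, if_false, not_false_eq_true, h9, h8, h7, h6, h5, h4, h3, h2, hp, d0, e1, cs]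
                    try omega
                  · -- count = 0
                    simp only [Order.lt_two_iff, zero_le_one, PySem.Int.mod_eq_emod_of_pos, EuclideanDomain.mod_eq_zero, ↓reduceIte, pickExp, Int.reduceToNat, Int.reducePow, Nat.ofNat_pos, divLoop, and_self, PySem.Int.floordiv_eq_ediv_of_pos, zero_add, Nat.one_lt_ofNat, Int.reduceAdd, Int.reduceLT, Prod.mk.injEq, and_true, true_and, false_and, and_false, if_true, if_false, not_false_eq_true, h9, h8, h7, h6, h5, h4, h3, h2, h1]
                    try omega

theorem lemma5 (x : Int) :
    (if PySem.Int.mod x 5 = 0 then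
      let f := pickExp x 5 [4,3,2,1] 0
      (PySem.Int.floordiv x (5 ^ f.toNat), f)
    else (x, 0)) = divLoop 5 4 4 x 0 := by
  by_cases h4 : (625:Int) ∣ x
  · -- count = 4
    obtain ⟨k, rfl⟩ := h4
    have hp : (625:Int) ∣ 625 * k := ⟨k, rfl⟩
    have d0 : (5:Int) ∣ 625 * k := ⟨125 * k, by rw [← mul_assoc]; norm_num⟩
    have d1 : (5:Int) ∣ 125 * k := ⟨25 * k, by rw [← mul_assoc]; norm_num⟩
    have d2 : (5:Int) ∣ 25 * k := ⟨5 * k, by rw [← mul_assoc]; norm_num⟩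
    have d3 : (5:Int) ∣ 5 * k := ⟨1 * k, by rw [← mul_assoc]; norm_num⟩
    have e1 : (625 * k : Int) / 5 = 125 * k := by rw [show (625*k:Int) = 5*(125*k) from by rw [← mul_assoc]; norm_num, Int.mul_ediv_cancel_left _ (by norm_num)]
    have e2 : (125 * k : Int) / 5 = 25 * k := by rw [show (125*k:Int) = 5*(25*k) from by rw [← mul_assoc]; norm_num, Int.mul_ediv_cancel_left _ (by norm_num)]
    have e3 : (25 * k : Int) / 5 = 5 * k := by rw [show (25*k:Int) = 5*(5*k) from by rw [← mul_assoc]; norm_num, Int.mul_ediv_cancel_left _ (by norm_num)]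
    have e4 : (5 * k : Int) / 5 = k := Int.mul_ediv_cancel_left _ (by norm_num)
    have ea : (625 * k : Int) / 625 = k := Int.mul_ediv_cancel_left _ (by norm_num)
    simp only [Order.lt_two_iff, zero_le_one, PySem.Int.mod_eq_emod_of_pos, EuclideanDomain.mod_eq_zero, ↓reduceIte, pickExp, Int.reduceToNat, Int.reducePow, Nat.ofNat_pos, divLoop, and_self, PySem.Int.floordiv_eq_ediv_of_pos, zero_add, Nat.one_lt_ofNat, Int.reduceAdd, Int.reduceLT, Prod.mk.injEq, and_true, true_and, false_and, and_false, if_true, if_false, not_false_eq_true, hp, d0, d1, d2, d3, e1, e2, e3, e4, ea]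
    try omega
  ·
    by_cases h3 : (125:Int) ∣ x
    · -- count = 3
      obtain ⟨k, rfl⟩ := h3
      have hp : (125:Int) ∣ 125 * k := ⟨k, rfl⟩
      have d0 : (5:Int) ∣ 125 * k := ⟨25 * k, by rw [← mul_assoc]; norm_num⟩
      have d1 : (5:Int) ∣ 25 * k := ⟨5 * k, by rw [← mul_assoc]; norm_num⟩
      have d2 : (5:Int) ∣ 5 * k := ⟨1 * k, by rw [← mul_assoc]; norm_num⟩
      have e1 : (125 * k : Int) / 5 = 25 * k := by rw [show (125*k:Int) = 5*(25*k) from by rw [← mul_assoc]; norm_num, Int.mul_ediv_cancel_left _ (by norm_num)]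
      have e2 : (25 * k : Int) / 5 = 5 * k := by rw [show (25*k:Int) = 5*(5*k) from by rw [← mul_assoc]; norm_num, Int.mul_ediv_cancel_left _ (by norm_num)]
      have e3 : (5 * k : Int) / 5 = k := Int.mul_ediv_cancel_left _ (by norm_num)
      have ea : (125 * k : Int) / 125 = k := Int.mul_ediv_cancel_left _ (by norm_num)
      have cs : ¬ (5:Int) ∣ k := fun hk => by
        obtain ⟨m, hm⟩ := hk
        exact h4 ⟨m, by rw [hm]; ring⟩
      simp only [Order.lt_two_iff, zero_le_one, PySem.Int.mod_eq_emod_of_pos, EuclideanDomain.mod_eq_zero, ↓reduceIte, pickExp, Int.reduceToNat, Int.reducePow, Nat.ofNat_pos, divLoop, and_self, PySem.Int.floordiv_eq_ediv_of_pos, zero_add, Nat.one_lt_ofNat, Int.reduceAdd, Int.reduceLT, Prod.mk.injEq, and_true, true_and, false_and, and_false, if_true, if_false, not_false_eq_true, h4, hp, d0, d1, d2, e1, e2, e3, ea, cs]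
      try omega
    ·
      by_cases h2 : (25:Int) ∣ x
      · -- count = 2
        obtain ⟨k, rfl⟩ := h2
        have hp : (25:Int) ∣ 25 * k := ⟨k, rfl⟩
        have d0 : (5:Int) ∣ 25 * k := ⟨5 * k, by rw [← mul_assoc]; norm_num⟩
        have d1 : (5:Int) ∣ 5 * k := ⟨1 * k, by rw [← mul_assoc]; norm_num⟩
        have e1 : (25 * k : Int) / 5 = 5 * k := by rw [show (25*k:Int) = 5*(5*k) from by rw [← mul_assoc]; norm_num, Int.mul_ediv_cancel_left _ (by norm_num)]
        have e2 : (5 * k : Int) / 5 = k := Int.mul_ediv_cancel_left _ (by norm_num)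
        have ea : (25 * k : Int) / 25 = k := Int.mul_ediv_cancel_left _ (by norm_num)
        have cs : ¬ (5:Int) ∣ k := fun hk => by
          obtain ⟨m, hm⟩ := hk
          exact h3 ⟨m, by rw [hm]; ring⟩
        simp only [Order.lt_two_iff, zero_le_one, PySem.Int.mod_eq_emod_of_pos, EuclideanDomain.mod_eq_zero, ↓reduceIte, pickExp, Int.reduceToNat, Int.reducePow, Nat.ofNat_pos, divLoop, and_self, PySem.Int.floordiv_eq_ediv_of_pos, zero_add, Nat.one_lt_ofNat, Int.reduceAdd, Int.reduceLT, Prod.mk.injEq, and_true, true_and, false_and, and_false, if_true, if_false, not_false_eq_true, h4, h3, hp, d0, d1, e1, e2, ea, cs]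
        try omega
      ·
        by_cases h1 : (5:Int) ∣ x
        · -- count = 1
          obtain ⟨k, rfl⟩ := h1
          have hp : (5:Int) ∣ 5 * k := ⟨k, rfl⟩
          have d0 : (5:Int) ∣ 5 * k := ⟨1 * k, by rw [← mul_assoc]; norm_num⟩
          have e1 : (5 * k : Int) / 5 = k := Int.mul_ediv_cancel_left _ (by norm_num)
          have ea : (5 * k : Int) / 5 = k := Int.mul_ediv_cancel_left _ (by norm_num)
          have cs : ¬ (5:Int) ∣ k := fun hk => by
            obtain ⟨m, hm⟩ := hk
            exact h2 ⟨m, by rw [hm]; ring⟩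
          simp only [Order.lt_two_iff, zero_le_one, PySem.Int.mod_eq_emod_of_pos, EuclideanDomain.mod_eq_zero, ↓reduceIte, pickExp, Int.reduceToNat, Int.reducePow, Nat.ofNat_pos, divLoop, and_self, PySem.Int.floordiv_eq_ediv_of_pos, zero_add, Nat.one_lt_ofNat, Int.reduceAdd, Int.reduceLT, Prod.mk.injEq, and_true, true_and, false_and, and_false, if_true, if_false, not_false_eq_true, h4, h3, h2, hp, d0, e1, ea, cs]
          try omega
        · -- count = 0
          simp only [Order.lt_two_iff, zero_le_one, PySem.Int.mod_eq_emod_of_pos, EuclideanDomain.mod_eq_zero, ↓reduceIte, pickExp, Int.reduceToNat, Int.reducePow, Nat.ofNat_pos, divLoop, and_self, PySem.Int.floordiv_eq_ediv_of_pos, zero_add, Nat.one_lt_ofNat, Int.reduceAdd, Int.reduceLT, Prod.mk.injEq, and_true, true_and, false_and, and_false, if_true, if_false, not_false_eq_true, h4, h3, h2, h1]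
          try omega

-- ===== VERDICT (by name: the statement is the Claim_ definition above) =====
theorem twofive_spec : Claim_equal_twofive := by
  intro x _
  show twofive x = twofive_alt x
  simp only [twofive, twofive_alt, pyRange40, pyRange90]
  rw [lemma5, lemma2]
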